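-- pv_equiv track=rewrite | github.com/takumi0310s/keiba-ai | train/train_nar_v4_leakfree.py | calc_bets
-- ===== SOURCE A (Python) =====
-- def calc_bets(ranking):
--     if len(ranking) < 3:
--         return [], [], []
--     nums = ranking[:6] if len(ranking) >= 6 else ranking
--     n1 = nums[0]
--     second = nums[1:3]
--     third = nums[1:min(6, len(nums))]
--     trio_bets = sorted(set(
--         tuple(sorted({n1, s, t}))
--         for s in second for t in third
--         if len(set({n1, s, t})) == 3
--     ))
--     umaren_bets = [sorted([n1, nums[1]]), sorted([n1, nums[2]])]
--     wide_bets = [sorted([n1, nums[1]]), sorted([n1, nums[2]])]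
--     return trio_bets, wide_bets, umaren_bets
-- ===== SOURCE B (Python) =====
-- import itertools
--
-- def calc_bets(ranking):
--     if len(ranking) < 3:
--         return [], [], []
--     nums = ranking[:6]
--     n1 = nums[0]
--     tail = set(nums[1:]) - {n1}
--     top = set(nums[1:3]) - {n1}
--     trio_bets = [
--         tuple(sorted((n1, a, b)))
--         for a, b in itertools.combinations(sorted(tail), 2)
--         if a in top or b in top
--     ]
--     pair1 = sorted([n1, nums[1]])
--     pair2 = sorted([n1, nums[2]])
--     return sorted(trio_bets), [pair1, pair2], [pair1, pair2]
-- ===== Notes on version B (the rewrite author's own statement) =====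
-- stated objective: alternative
-- what changed: Replaces A's nested second-by-third scan with its per-candidate set-size test and final set() dedup by one filtered pass over itertools.combinations of the deduped sorted tail values (each unordered pair produced exactly once, kept when one member is a top-two value), so no dedup of trios is needed.
import Mathlib
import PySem

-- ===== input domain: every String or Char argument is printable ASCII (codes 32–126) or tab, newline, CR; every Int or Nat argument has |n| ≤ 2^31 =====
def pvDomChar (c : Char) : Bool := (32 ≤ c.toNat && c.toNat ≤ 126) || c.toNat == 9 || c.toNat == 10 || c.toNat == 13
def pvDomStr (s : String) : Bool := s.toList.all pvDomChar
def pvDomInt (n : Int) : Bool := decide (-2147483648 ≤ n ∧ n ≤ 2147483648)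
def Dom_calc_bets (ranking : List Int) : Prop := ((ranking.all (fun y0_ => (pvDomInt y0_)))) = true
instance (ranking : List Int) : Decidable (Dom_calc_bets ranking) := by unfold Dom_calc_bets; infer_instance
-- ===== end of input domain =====

-- B replaces A's nested second×third scan (with its per-pair set-size test and set-based dedup of
-- trios) by a single filtered pass over itertools.combinations of the deduped sorted tail values,
-- which yields each candidate unordered pair exactly once; objective: alternative decomposition.

-- shared helper: Python's tuple(<3-element sorted list>) as a triple (the `_ => (0,0,0)` arm is unreachable)
def tup3 (s : List Int) : Int × Int × Int :=
  match s with
  | [x, y, z] => (x, y, z)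
  | _ => (0, 0, 0)

-- Python compares int-triples lexicographically: sort key into the lexicographic product order
def lexKey (p : Int × Int × Int) : Lex (Int × Lex (Int × Int)) := toLex (p.1, toLex (p.2.1, p.2.2))

-- ===== PORT A =====
def calc_bets (ranking : List Int) : (List (Int × Int × Int)) × List (List Int) × List (List Int) :=
  if PySem.List.len ranking < 3 then ([], [], [])
  else
    let nums := if PySem.List.len ranking ≥ 6 then PySem.List.slice ranking none (some 6) else ranking
    let n1 := PySem.List.pyGetD nums 0 0
    let second := PySem.List.slice nums (some 1) (some 3)
    let third := PySem.List.slice nums (some 1) (some (min 6 (PySem.List.len nums)))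
    let raw := second.flatMap (fun s =>
      (third.filter (fun t => PySem.Set.len (PySem.Set.ofList [n1, s, t]) == 3)).map
        (fun t => tup3 (PySem.List.sorted (PySem.Set.ofList [n1, s, t]) (fun x => x) false)))
    let trio := PySem.List.sorted (PySem.Set.ofList raw) lexKey false
    let u1 := PySem.List.sorted [n1, PySem.List.pyGetD nums 1 0] (fun x => x) false
    let u2 := PySem.List.sorted [n1, PySem.List.pyGetD nums 2 0] (fun x => x) false
    (trio, [u1, u2], [u1, u2])

-- ===== PORT B =====
def calc_bets_alt (ranking : List Int) : (List (Int × Int × Int)) × List (List Int) × List (List Int) :=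
  if PySem.List.len ranking < 3 then ([], [], [])
  else
    let nums := PySem.List.slice ranking none (some 6)
    let n1 := PySem.List.pyGetD nums 0 0
    let tail := PySem.Set.diff (PySem.Set.ofList (PySem.List.slice nums (some 1) none)) [n1]
    let top := PySem.Set.diff (PySem.Set.ofList (PySem.List.slice nums (some 1) (some 3))) [n1]
    let raw := (PySem.List.combinations (PySem.List.sorted tail (fun x => x) false) 2).filterMap
      (fun p => match p with
        | [a, b] =>
          if PySem.Set.contains top a || PySem.Set.contains top b
          then some (tup3 (PySem.List.sorted [n1, a, b] (fun x => x) false)) else none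
        | _ => none)
    let u1 := PySem.List.sorted [n1, PySem.List.pyGetD nums 1 0] (fun x => x) false
    let u2 := PySem.List.sorted [n1, PySem.List.pyGetD nums 2 0] (fun x => x) false
    (PySem.List.sorted raw lexKey false, [u1, u2], [u1, u2])

-- ===== PRECONDITION & SPEC =====
def Spec_calc_bets (ranking : List Int) (out : (List (Int × Int × Int)) × List (List Int) × List (List Int)) : Prop := out = calc_bets_alt ranking
instance (ranking : List Int) (out : (List (Int × Int × Int)) × List (List Int) × List (List Int)) : Decidable (Spec_calc_bets ranking out) := by unfold Spec_calc_bets; infer_instance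

-- ===== CLAIM (what is proved, stated in full; the proofs are below) =====
def Claim_equal_calc_bets : Prop := ∀ (ranking : List Int), Dom_calc_bets ranking → Spec_calc_bets ranking (calc_bets ranking)

-- ===== LEMMAS AND PROOFS =====

-- the sorted triple of the three distinct values x, a, b as B computes it
def trip (x a b : Int) : Int × Int × Int := tup3 (PySem.List.sorted [x, a, b] (fun y => y) false)

-- A's per-candidate test `len(set({n1, s, t})) == 3` says exactly: the three values are distinct
theorem card3_iff (a b c : Int) :
    ((PySem.Set.len (PySem.Set.ofList [a, b, c]) == 3) = true) ↔ a ≠ b ∧ a ≠ c ∧ b ≠ c := by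
  by_cases hab : a = b <;> by_cases hac : a = c <;> by_cases hbc : b = c <;>
    simp [PySem.Set.ofList, PySem.Set.add, PySem.Set.len, hab, hac, hbc, eq_comm]

theorem ofList3_eq (a b c : Int) (hab : a ≠ b) (hac : a ≠ c) (hbc : b ≠ c) :
    PySem.Set.ofList [a, b, c] = [a, b, c] := by
  apply PySem.Set.ofList_eq_self_of_nodup
  simp [hab, hac, hbc]

theorem sorted_swap (x s t : Int) :
    PySem.List.sorted [x, s, t] (fun y => y) false = PySem.List.sorted [x, t, s] (fun y => y) false := by
  apply PySem.List.sorted_eq_sorted_of_perm _ _ _ (fun p q h => h)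
  exact List.Perm.cons x (List.Perm.swap t s [])

theorem sorted3_eq (x a b : Int) (hxa : x ≠ a) (hxb : x ≠ b) (hab : a < b) :
    PySem.List.sorted [x, a, b] (fun y => y) false =
      if x < a then [x, a, b] else if x < b then [a, x, b] else [a, b, x] := by
  split_ifs with h1 h2
  · exact PySem.List.sorted_eq_of_perm_of_pairwise_lt _ _ _ (List.Perm.refl _)
      (by simp [List.pairwise_cons]; omega)
  · exact PySem.List.sorted_eq_of_perm_of_pairwise_lt _ _ _ (List.Perm.swap x a [b])
      (by simp [List.pairwise_cons]; omega)
  · exact PySem.List.sorted_eq_of_perm_of_pairwise_lt _ _ _ (List.perm_append_singleton x [a, b])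
      (by simp [List.pairwise_cons]; omega)

theorem trip_inj (x a b a' b' : Int) (hxa : x ≠ a) (hxb : x ≠ b) (hab : a < b)
    (hxa' : x ≠ a') (hxb' : x ≠ b') (hab' : a' < b')
    (h : trip x a b = trip x a' b') : a = a' ∧ b = b' := by
  unfold trip at h
  rw [sorted3_eq x a b hxa hxb hab, sorted3_eq x a' b' hxa' hxb' hab'] at h
  split_ifs at h <;> simp [tup3, Prod.ext_iff] at h <;> omega

theorem sorted_strict (xs : List Int) (h : xs.Nodup) :
    (PySem.List.sorted xs (fun y => y) false).Pairwise (· < ·) := by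
  have hp := PySem.List.sorted_pairwise xs (fun y => y)
  have hn : (PySem.List.sorted xs (fun y => y) false).Nodup :=
    (PySem.List.sorted_perm xs (fun y => y) false).nodup_iff.mpr h
  exact (hp.and hn).imp (fun hc => lt_of_le_of_ne hc.1 hc.2)

theorem pair_sublist_iff (xs : List Int) (h : xs.Pairwise (· < ·)) (a b : Int) :
    [a, b].Sublist xs ↔ a ∈ xs ∧ b ∈ xs ∧ a < b := by
  constructor
  · intro hs
    have hp := h.sublist hs
    simp [List.pairwise_cons] at hp
    exact ⟨hs.subset (by simp), hs.subset (by simp), hp⟩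
  · rintro ⟨ha, hb, hlt⟩
    induction xs with
    | nil => simp at ha
    | cons y t ih =>
      rcases List.mem_cons.mp ha with rfl | hat
      · have hbt : b ∈ t := by
          rcases List.mem_cons.mp hb with rfl | hbt
          · omega
          · exact hbt
        exact (List.singleton_sublist.mpr hbt).cons₂ a
      · have hya : y < a := (List.pairwise_cons.mp h).1 a hat
        have hbt : b ∈ t := by
          rcases List.mem_cons.mp hb with rfl | hbt
          · omega
          · exact hbt
        exact (ih (List.pairwise_cons.mp h).2 hat hbt).cons y

theorem nodup_combos2 (xs : List Int) (h : xs.Nodup) :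
    (PySem.List.combinations xs 2).Nodup := by
  induction xs with
  | nil => simp [PySem.List.combinations_nil_succ]
  | cons y t ih =>
    rw [PySem.List.combinations_cons_succ, PySem.List.combinations_one]
    rcases List.nodup_cons.mp h with ⟨hyt, hnt⟩
    refine List.Nodup.append ?_ (ih hnt) ?_
    · rw [List.map_map]
      exact hnt.map (by intro u v huv; simpa using huv)
    · intro c hc1 hc2
      rcases List.mem_map.mp hc1 with ⟨u, hu, rfl⟩
      have := (PySem.List.sublist_of_mem_combinations hc2).subset
      simp at this
      exact hyt this.1

theorem lexKey_inj : Function.Injective lexKey := by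
  intro ⟨a, b, c⟩ ⟨d, e, f⟩ h
  simpa [lexKey, Prod.ext_iff] using h

theorem nodup_filterMap_on {α β : Type} (f : α → Option β) (l : List α) (hl : l.Nodup)
    (hinj : ∀ p ∈ l, ∀ q ∈ l, ∀ x : β, f p = some x → f q = some x → p = q) :
    (l.filterMap f).Nodup := by
  induction l with
  | nil => simp
  | cons a t ih =>
    rcases List.nodup_cons.mp hl with ⟨hat, hnt⟩
    rw [List.filterMap_cons]
    cases hfa : f a with
    | none => exact ih hnt (fun p hp q hq x h1 h2 => hinj p (by simp [hp]) q (by simp [hq]) x h1 h2)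
    | some b =>
      rw [List.nodup_cons]
      refine ⟨?_, ih hnt (fun p hp q hq x h1 h2 => hinj p (by simp [hp]) q (by simp [hq]) x h1 h2)⟩
      intro hb
      rcases List.mem_filterMap.mp hb with ⟨q, hq, hfq⟩
      have : a = q := hinj a (by simp) q (by simp [hq]) b hfa hfq
      exact hat (this ▸ hq)

theorem list_len2 {α : Type} (p : List α) (h : p.length = 2) : ∃ a b, p = [a, b] := by
  match p, h with | [a, b], _ => exact ⟨a, b, rfl⟩

-- the heart: A's deduped trio list and B's combination scan hold the same triples,
-- B's list has no duplicates, so both sorts return the same list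
theorem trio_core (n1 : Int) (rest : List Int) :
    PySem.List.sorted (PySem.Set.ofList ((rest.take 2).flatMap (fun s =>
        (rest.filter (fun t => PySem.Set.len (PySem.Set.ofList [n1, s, t]) == 3)).map
          (fun t => tup3 (PySem.List.sorted (PySem.Set.ofList [n1, s, t]) (fun x => x) false))))) lexKey false
    = PySem.List.sorted ((PySem.List.combinations
          (PySem.List.sorted (PySem.Set.diff (PySem.Set.ofList rest) [n1]) (fun x => x) false) 2).filterMap
        (fun p => match p with
          | [a, b] =>
            if PySem.Set.contains (PySem.Set.diff (PySem.Set.ofList (rest.take 2)) [n1]) a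
               || PySem.Set.contains (PySem.Set.diff (PySem.Set.ofList (rest.take 2)) [n1]) b
            then some (tup3 (PySem.List.sorted [n1, a, b] (fun x => x) false)) else none
          | _ => none)) lexKey false := by
  set tailS := PySem.Set.diff (PySem.Set.ofList rest) [n1] with htail
  set topS := PySem.Set.diff (PySem.Set.ofList (rest.take 2)) [n1] with htop
  set st := PySem.List.sorted tailS (fun x => x) false with hstdef
  set f : List Int → Option (Int × Int × Int) := (fun p => match p with
          | [a, b] =>
            if PySem.Set.contains topS a || PySem.Set.contains topS b
            then some (tup3 (PySem.List.sorted [n1, a, b] (fun x => x) false)) else none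
          | _ => none) with hf
  have hndtail : tailS.Nodup := PySem.Set.nodup_diff _ _ (PySem.Set.nodup_ofList rest)
  have hstnd : st.Nodup := (PySem.List.sorted_perm tailS (fun x => x) false).nodup_iff.mpr hndtail
  have hstp : st.Pairwise (· < ·) := sorted_strict tailS hndtail
  have hmemst : ∀ z, z ∈ st ↔ z ∈ rest ∧ z ≠ n1 := by
    intro z
    rw [hstdef, PySem.List.mem_sorted, htail, PySem.Set.mem_diff]
    simp [PySem.Set.mem_ofList]
  have hmemtop : ∀ z, z ∈ topS ↔ z ∈ rest.take 2 ∧ z ≠ n1 := by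
    intro z
    rw [htop, PySem.Set.mem_diff]
    simp [PySem.Set.mem_ofList]
  have hfeval : ∀ a b x, (f [a, b] = some x) ↔ ((a ∈ topS ∨ b ∈ topS) ∧ x = trip n1 a b) := by
    intro a b x
    rw [hf]
    show (if PySem.Set.contains topS a || PySem.Set.contains topS b then _ else none) = some x ↔ _
    split_ifs with hc
    · simp only [Option.some_inj]
      rw [Bool.or_eq_true, PySem.Set.contains_iff, PySem.Set.contains_iff] at hc
      constructor
      · intro h; exact ⟨hc, h.symm⟩
      · intro h; exact h.2.symm
    · rw [Bool.or_eq_true, PySem.Set.contains_iff, PySem.Set.contains_iff] at hc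
      simp
      intro h; exact absurd h hc
  have memB : ∀ x, x ∈ (PySem.List.combinations st 2).filterMap f ↔
      ∃ a b, a ∈ st ∧ b ∈ st ∧ a < b ∧ (a ∈ topS ∨ b ∈ topS) ∧ x = trip n1 a b := by
    intro x
    rw [List.mem_filterMap]
    constructor
    · rintro ⟨p, hp, hfp⟩
      obtain ⟨hsub, hlen⟩ := (PySem.List.mem_combinations_iff st 2 p).mp hp
      obtain ⟨a, b, rfl⟩ := list_len2 p hlen
      obtain ⟨ha, hb, hab⟩ := (pair_sublist_iff st hstp a b).mp hsub
      obtain ⟨hc, hx⟩ := (hfeval a b x).mp hfp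
      exact ⟨a, b, ha, hb, hab, hc, hx⟩
    · rintro ⟨a, b, ha, hb, hab, hc, hx⟩
      refine ⟨[a, b], ?_, (hfeval a b x).mpr ⟨hc, hx⟩⟩
      rw [PySem.List.mem_combinations_iff]
      exact ⟨(pair_sublist_iff st hstp a b).mpr ⟨ha, hb, hab⟩, rfl⟩
  have memA : ∀ x, x ∈ (rest.take 2).flatMap (fun s =>
        (rest.filter (fun t => PySem.Set.len (PySem.Set.ofList [n1, s, t]) == 3)).map
          (fun t => tup3 (PySem.List.sorted (PySem.Set.ofList [n1, s, t]) (fun x => x) false))) ↔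
      ∃ s t, s ∈ rest.take 2 ∧ t ∈ rest ∧ n1 ≠ s ∧ n1 ≠ t ∧ s ≠ t ∧
        x = tup3 (PySem.List.sorted (PySem.Set.ofList [n1, s, t]) (fun x => x) false) := by
    intro x
    rw [List.mem_flatMap]
    constructor
    · rintro ⟨s, hs, hx⟩
      rcases List.mem_map.mp hx with ⟨t, ht, rfl⟩
      rcases List.mem_filter.mp ht with ⟨ht', hcard⟩
      obtain ⟨h1, h2, h3⟩ := (card3_iff n1 s t).mp hcard
      exact ⟨s, t, hs, ht', h1, h2, h3, rfl⟩
    · rintro ⟨s, t, hs, ht, h1, h2, h3, rfl⟩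
      refine ⟨s, hs, List.mem_map.mpr ⟨t, List.mem_filter.mpr ⟨ht, (card3_iff n1 s t).mpr ⟨h1, h2, h3⟩⟩, rfl⟩⟩
  have hiff : ∀ x, x ∈ PySem.Set.ofList ((rest.take 2).flatMap (fun s =>
        (rest.filter (fun t => PySem.Set.len (PySem.Set.ofList [n1, s, t]) == 3)).map
          (fun t => tup3 (PySem.List.sorted (PySem.Set.ofList [n1, s, t]) (fun x => x) false)))) ↔
      x ∈ (PySem.List.combinations st 2).filterMap f := by
    intro x
    rw [PySem.Set.mem_ofList, memA x, memB x]
    constructor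
    · rintro ⟨s, t, hs, ht, h1, h2, h3, rfl⟩
      have hs' : s ∈ rest := List.take_subset 2 rest hs
      rcases lt_trichotomy s t with hlt | heq | hgt
      · refine ⟨s, t, (hmemst s).mpr ⟨hs', h1.symm⟩, (hmemst t).mpr ⟨ht, h2.symm⟩, hlt,
          Or.inl ((hmemtop s).mpr ⟨hs, h1.symm⟩), ?_⟩
        rw [ofList3_eq n1 s t h1 h2 h3]
        rfl
      · exact absurd heq h3
      · refine ⟨t, s, (hmemst t).mpr ⟨ht, h2.symm⟩, (hmemst s).mpr ⟨hs', h1.symm⟩, hgt,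
          Or.inr ((hmemtop s).mpr ⟨hs, h1.symm⟩), ?_⟩
        rw [ofList3_eq n1 s t h1 h2 h3]
        show tup3 _ = tup3 _
        rw [sorted_swap n1 s t]
    · rintro ⟨a, b, ha, hb, hab, hc, rfl⟩
      obtain ⟨har, han⟩ := (hmemst a).mp ha
      obtain ⟨hbr, hbn⟩ := (hmemst b).mp hb
      rcases hc with hc | hc
      · obtain ⟨ha2, _⟩ := (hmemtop a).mp hc
        refine ⟨a, b, ha2, hbr, han.symm, hbn.symm, ne_of_lt hab, ?_⟩
        rw [ofList3_eq n1 a b han.symm hbn.symm (ne_of_lt hab)]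
        rfl
      · obtain ⟨hb2, _⟩ := (hmemtop b).mp hc
        refine ⟨b, a, hb2, har, hbn.symm, han.symm, (ne_of_lt hab).symm, ?_⟩
        rw [ofList3_eq n1 b a hbn.symm han.symm (ne_of_lt hab).symm]
        show trip n1 a b = tup3 _
        rw [trip, sorted_swap n1 b a]
  have hndB : ((PySem.List.combinations st 2).filterMap f).Nodup := by
    apply nodup_filterMap_on f _ (nodup_combos2 st hstnd)
    intro p hp q hq x hfp hfq
    obtain ⟨hsubp, hlenp⟩ := (PySem.List.mem_combinations_iff st 2 p).mp hp
    obtain ⟨hsubq, hlenq⟩ := (PySem.List.mem_combinations_iff st 2 q).mp hq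
    obtain ⟨a, b, rfl⟩ := list_len2 p hlenp
    obtain ⟨a', b', rfl⟩ := list_len2 q hlenq
    obtain ⟨ha, hb, hab⟩ := (pair_sublist_iff st hstp a b).mp hsubp
    obtain ⟨ha', hb', hab'⟩ := (pair_sublist_iff st hstp a' b').mp hsubq
    obtain ⟨_, hx⟩ := (hfeval a b x).mp hfp
    obtain ⟨_, hx'⟩ := (hfeval a' b' x).mp hfq
    obtain ⟨rfl, rfl⟩ := trip_inj n1 a b a' b'
      ((hmemst a).mp ha).2.symm ((hmemst b).mp hb).2.symm hab
      ((hmemst a').mp ha').2.symm ((hmemst b').mp hb').2.symm hab'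
      (hx.symm.trans hx')
    rfl
  apply PySem.List.sorted_eq_sorted_of_perm _ _ lexKey lexKey_inj
  exact (List.perm_ext_iff_of_nodup (PySem.Set.nodup_ofList _) hndB).mpr hiff

theorem calc_bets_eq_alt (ranking : List Int) : calc_bets ranking = calc_bets_alt ranking := by
  by_cases h : PySem.List.len ranking < 3
  · have h' : ranking.length < 3 := by simpa [PySem.List.len_eq] using h
    simp [calc_bets, calc_bets_alt, PySem.List.len_eq, h']
  · have h6 : PySem.List.slice ranking none (some 6) = ranking.take 6 := by
      simpa using PySem.List.slice_to_natCast ranking 6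
    have hnums : (if PySem.List.len ranking ≥ 6 then PySem.List.slice ranking none (some 6) else ranking)
        = ranking.take 6 := by
      split_ifs with hge
      · exact h6
      · rw [List.take_of_length_le]
        simp [PySem.List.len_eq] at hge
        omega
    have hmin : min (6 : Int) (PySem.List.len (ranking.take 6)) = (((ranking.take 6).length : Nat) : Int) := by
      simp [PySem.List.len_eq]
    have hthird : PySem.List.slice (ranking.take 6) (some 1) (some (((ranking.take 6).length : Nat) : Int))
        = (ranking.take 6).drop 1 := by
      have hs := PySem.List.slice_natCast (ranking.take 6) 1 (ranking.take 6).length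
      simp only [Nat.cast_one] at hs
      rw [hs]
      exact List.take_of_length_le (by simp)
    have hsecond : PySem.List.slice (ranking.take 6) (some 1) (some 3) = ((ranking.take 6).drop 1).take 2 := by
      simpa using PySem.List.slice_natCast (ranking.take 6) 1 3
    have htail : PySem.List.slice (ranking.take 6) (some 1) none = (ranking.take 6).drop 1 := by
      rw [PySem.List.slice_from_one, List.drop_one]
    simp only [calc_bets, calc_bets_alt, if_neg h]
    rw [hnums, h6, hmin, hthird, hsecond, htail]
    rw [trio_core (PySem.List.pyGetD (ranking.take 6) 0 0) ((ranking.take 6).drop 1)]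

-- ===== VERDICT (by name: the statement is the Claim_ definition above) =====
theorem calc_bets_spec : Claim_equal_calc_bets := fun ranking _ => calc_bets_eq_alt ranking
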